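-- pv_equiv track=rewrite | github.com/SergiyShklyar/FL-studing-p | Simple_game.py | zeros_positives_and_sum
-- ===== SOURCE A (Python) =====
-- def zeros_positives_and_sum(a_list):
--     z = 0
--     p = 0
--     s = 0
--     for x in a_list:
--         if x == 0:
--             z = z + 1
--         if x > 0:
--             p = p + 1
--         s = s + x
--     return z, p, s
-- ===== SOURCE B (Python) =====
-- def zeros_positives_and_sum(a_list):
--     z = a_list.count(0)
--     p = sum(1 for x in a_list if x > 0)
--     s = sum(a_list)
--     return z, p, s
-- ===== Notes on version B (the rewrite author's own statement) =====
-- stated objective: simpler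
-- what changed: The single fused accumulator loop is replaced by three independent aggregations: list.count(0), a filtered count, and sum().
import Mathlib
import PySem

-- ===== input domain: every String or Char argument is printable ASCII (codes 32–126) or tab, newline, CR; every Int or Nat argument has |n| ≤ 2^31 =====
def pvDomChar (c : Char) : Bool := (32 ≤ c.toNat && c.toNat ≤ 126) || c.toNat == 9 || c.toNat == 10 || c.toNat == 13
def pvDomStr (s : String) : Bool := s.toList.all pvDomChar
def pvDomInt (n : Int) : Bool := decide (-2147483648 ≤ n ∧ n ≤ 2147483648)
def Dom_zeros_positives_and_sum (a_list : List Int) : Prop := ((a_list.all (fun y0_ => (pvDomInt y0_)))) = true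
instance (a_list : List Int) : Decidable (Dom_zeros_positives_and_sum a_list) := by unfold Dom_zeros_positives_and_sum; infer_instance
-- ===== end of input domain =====

-- B replaces A's single fused accumulator loop with three independent aggregations (count, filtered count, sum); objective: simpler.


-- ===== PORT A =====
-- one fold over the list carrying (z, p, s), updating all three per element
def zeros_positives_and_sum (a_list : List Int) : Int × Int × Int :=
  a_list.foldl
    (fun st x =>
      let z := if x == 0 then st.1 + 1 else st.1
      let p := if x > 0 then st.2.1 + 1 else st.2.1
      (z, p, st.2.2 + x))
    (0, 0, 0)

-- ===== PORT B =====
-- three independent passes: count of zeros, count of positives, sum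
def zeros_positives_and_sum_alt (a_list : List Int) : Int × Int × Int :=
  ((PySem.List.count a_list 0 : Int),
   ((a_list.filter (fun x => x > 0)).length : Int),
   a_list.sum)

-- ===== PRECONDITION & SPEC =====
def Spec_zeros_positives_and_sum (a_list : List Int) (out : Int × Int × Int) : Prop := out = zeros_positives_and_sum_alt a_list
instance (a_list : List Int) (out : Int × Int × Int) : Decidable (Spec_zeros_positives_and_sum a_list out) := by unfold Spec_zeros_positives_and_sum; infer_instance

-- ===== CLAIM (what is proved, stated in full; the proofs are below) =====
def Claim_equal_zeros_positives_and_sum : Prop := ∀ (a_list : List Int), Dom_zeros_positives_and_sum a_list → Spec_zeros_positives_and_sum a_list (zeros_positives_and_sum a_list)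

-- ===== LEMMAS AND PROOFS =====
-- loop invariant: folding from state (z,p,s) adds B's three aggregates componentwise
theorem zpas_foldl_shift (l : List Int) (z p s : Int) :
    l.foldl
      (fun st x =>
        let z := if x == 0 then st.1 + 1 else st.1
        let p := if x > 0 then st.2.1 + 1 else st.2.1
        (z, p, st.2.2 + x))
      (z, p, s)
    = (z + (PySem.List.count l 0 : Int),
       p + ((l.filter (fun x => x > 0)).length : Int),
       s + l.sum) := by
  induction l generalizing z p s with
  | nil => simp [PySem.List.count]
  | cons x xs ih =>
    simp only [List.foldl, ih, PySem.List.count, List.count_cons, List.filter_cons]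
    by_cases h0 : x = 0 <;> by_cases hp : 0 < x <;>
      simp [h0, hp, Prod.ext_iff] <;> omega

-- ===== VERDICT (by name: the statement is the Claim_ definition above) =====
theorem zeros_positives_and_sum_spec : Claim_equal_zeros_positives_and_sum := by
  intro a_list _
  show _ = _
  simpa [zeros_positives_and_sum, zeros_positives_and_sum_alt] using
    zpas_foldl_shift a_list 0 0 0
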